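-- pv_equiv track=rewrite | github.com/Doridian/rfcat-mqtt | calculator.py | format_ardu_complex
-- ===== SOURCE A (Python) =====
-- def format_ardu_complex(times):
--     res = ""
--     last_bit = ""
--     last_delay = 0
--     for d in times:
--         bit = ""
--         if d < 0:
--             bit = "0"
--         elif d > 0:
--             bit = "1"
--         else:
--             continue
--         d = abs(d)
--         if bit == last_bit:
--             last_delay += d
--         else:
--             if last_bit != "":
--                 res += "%s%04x" % (last_bit, last_delay)
--             last_bit = bit
--             last_delay = d
--
--     res += "%s%04x" % (last_bit, last_delay)
--
--     return res
-- ===== SOURCE B (Python) =====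
-- def format_ardu_complex(times):
--     # Two-phase: drop zeros, then cut the pulse list into maximal same-sign
--     # runs and format each run as <bit><sum of magnitudes, %04x>.
--     # Intended difference: with no nonzero duration A returns "0000"
--     # (leftover loop state appended unconditionally); B returns "".
--     pulses = [d for d in times if d != 0]
--     out = []
--     i = 0
--     n = len(pulses)
--     while i < n:
--         d = pulses[i]
--         j = i + 1
--         while j < n and (pulses[j] < 0) == (d < 0):
--             j += 1
--         run = pulses[i:j]
--         out.append(("0" if d < 0 else "1") + "%04x" % sum(map(abs, run)))
--         i = j
--     return "".join(out)
-- ===== Notes on version B (the rewrite author's own statement) =====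
-- stated objective: alternative
-- what changed: Replaces A's single stateful fold (carrying res/last_bit/last_delay with a sentinel empty bit) by a two-phase pipeline: filter out zeros, cut the pulse list into maximal same-sign runs, format each run independently and join.
-- intended difference: On lists with no nonzero element A returns '0000' (the unconditional final append of the leftover state last_bit=''/last_delay=0), while B returns '' , the natural encoding of an empty pulse train. — e.g. on format_ardu_complex([0]): A returns "0000", B returns ""
import Mathlib
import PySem

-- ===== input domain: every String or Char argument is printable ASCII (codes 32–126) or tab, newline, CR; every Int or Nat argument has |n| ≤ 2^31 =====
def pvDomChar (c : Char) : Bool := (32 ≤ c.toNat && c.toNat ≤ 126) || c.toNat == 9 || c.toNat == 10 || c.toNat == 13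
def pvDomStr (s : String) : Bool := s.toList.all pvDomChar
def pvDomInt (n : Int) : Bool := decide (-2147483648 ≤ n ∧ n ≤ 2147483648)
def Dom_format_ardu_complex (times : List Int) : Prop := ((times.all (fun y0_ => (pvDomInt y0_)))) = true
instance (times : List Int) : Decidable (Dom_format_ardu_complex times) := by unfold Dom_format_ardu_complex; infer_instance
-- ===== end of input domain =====

-- B rewrites A's stateful run-length fold as filter-zeros / cut-into-same-sign-runs / format-and-join;
-- on all-zero input A returns "0000" (leftover loop state), B returns "" (stated as D_ below).

-- "%04x" of a value; exact for the nonnegative values both programs format (sums of absolute values).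
def hex4 (n : Int) : String :=
  let ds := Nat.toDigits 16 n.toNat
  String.ofList (List.replicate (4 - ds.length) '0' ++ ds)

-- ===== PORT A =====
-- one loop iteration of A: state = (res, last_bit, last_delay)
def astep (s : String × String × Int) (d : Int) : String × String × Int :=
  let res := s.1
  let last_bit := s.2.1
  let last_delay := s.2.2
  if d < 0 then
    let bit := "0"
    let d := |d|
    if bit == last_bit then (res, last_bit, last_delay + d)
    else ((if last_bit != "" then res ++ last_bit ++ hex4 last_delay else res), bit, d)
  else if d > 0 then
    let bit := "1"
    let d := |d|
    if bit == last_bit then (res, last_bit, last_delay + d)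
    else ((if last_bit != "" then res ++ last_bit ++ hex4 last_delay else res), bit, d)
  else s  -- continue

def format_ardu_complex (times : List Int) : String :=
  let s := times.foldl astep ("", "", 0)
  s.1 ++ s.2.1 ++ hex4 s.2.2

-- ===== PORT B =====
-- the while-loop of B: peel off the maximal same-sign run and format it
def runsB : List Int → List String
  | [] => []
  | d :: t =>
    let run := t.takeWhile (fun x => decide (x < 0) == decide (d < 0))
    let rest := t.dropWhile (fun x => decide (x < 0) == decide (d < 0))
    ((if d < 0 then "0" else "1") ++ hex4 ((d :: run).foldl (fun a x => a + |x|) 0)) :: runsB rest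
termination_by l => l.length
decreasing_by
  simpa using Nat.lt_succ_of_le (List.length_dropWhile_le _ t)

def format_ardu_complex_alt (times : List Int) : String :=
  String.join (runsB (times.filter (fun d => !(d == 0))))

-- ===== PRECONDITION & SPEC =====
-- On lists with no nonzero element A returns "0000" (unconditional final append of the leftover
-- state last_bit = "" / last_delay = 0), while B returns "", the natural encoding of an empty
-- pulse train.
def D_format_ardu_complex (times : List Int) : Prop := ∀ d ∈ times, d = 0
instance (times : List Int) : Decidable (D_format_ardu_complex times) := by unfold D_format_ardu_complex; infer_instance

def Spec_format_ardu_complex (times : List Int) (out : String) : Prop := ¬ D_format_ardu_complex times → out = format_ardu_complex_alt times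
instance (times : List Int) (out : String) : Decidable (Spec_format_ardu_complex times out) := by unfold Spec_format_ardu_complex; infer_instance

def pvDiffWitness_format_ardu_complex : List Int := ([0])
def pvDiffWitnessOut_format_ardu_complex : String × String := ("0000", "")

-- ===== CLAIM (what is proved, stated in full; the proofs are below) =====
def Claim_unchanged_format_ardu_complex : Prop := ∀ (times : List Int), Dom_format_ardu_complex times → Spec_format_ardu_complex times (format_ardu_complex times)
def Claim_changed_format_ardu_complex : Prop := Dom_format_ardu_complex (pvDiffWitness_format_ardu_complex) ∧ D_format_ardu_complex (pvDiffWitness_format_ardu_complex) ∧ format_ardu_complex (pvDiffWitness_format_ardu_complex) = pvDiffWitnessOut_format_ardu_complex.1 ∧ format_ardu_complex_alt (pvDiffWitness_format_ardu_complex) = pvDiffWitnessOut_format_ardu_complex.2 ∧ pvDiffWitnessOut_format_ardu_complex.1 ≠ pvDiffWitnessOut_format_ardu_complex.2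
def Claim_exact_format_ardu_complex : Prop := ∀ (times : List Int), Dom_format_ardu_complex times → D_format_ardu_complex times → format_ardu_complex times ≠ format_ardu_complex_alt times

-- ===== LEMMAS AND PROOFS =====

-- spec-level run-length recursion both ports are reduced to
def rl (neg : Bool) (delay : Int) : List Int → String
  | [] => (if neg then "0" else "1") ++ hex4 delay
  | d :: t =>
    if decide (d < 0) == neg then rl neg (delay + |d|) t
    else ((if neg then "0" else "1") ++ hex4 delay) ++ rl (decide (d < 0)) |d| t

def sumabs (l : List Int) : Int := l.foldl (fun a x => a + |x|) 0

def bitStr (neg : Bool) : String := if neg then "0" else "1"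

lemma sumabs_shift (l : List Int) (c : Int) :
    l.foldl (fun a x => a + |x|) c = c + sumabs l := by
  induction l generalizing c with
  | nil => simp [sumabs]
  | cons d t ih =>
    rw [List.foldl_cons, ih (c + |d|),
      show sumabs (d :: t) = List.foldl (fun a x => a + |x|) (0 + |d|) t from rfl,
      ih (0 + |d|)]
    ring

lemma sumabs_cons (d : Int) (t : List Int) : sumabs (d :: t) = |d| + sumabs t := by
  rw [show sumabs (d :: t) = List.foldl (fun a x => a + |x|) (0 + |d|) t from rfl,
    sumabs_shift]
  ring

lemma join_nil : String.join ([] : List String) = "" := rfl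

lemma foldl_append_shift (l : List String) (s : String) :
    l.foldl (fun r t => r ++ t) s = s ++ l.foldl (fun r t => r ++ t) "" := by
  induction l generalizing s with
  | nil => simp
  | cons a l ih =>
    rw [List.foldl_cons, ih (s ++ a), List.foldl_cons, ih (("" : String) ++ a)]
    simp [String.append_assoc]

lemma join_cons (a : String) (l : List String) :
    String.join (a :: l) = a ++ String.join l := by
  show (a :: l).foldl (fun r t => r ++ t) "" = a ++ l.foldl (fun r t => r ++ t) ""
  rw [List.foldl_cons, foldl_append_shift]
  simp

-- zeros are skipped by A's loop
lemma foldl_astep_filter (times : List Int) (s : String × String × Int) :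
    times.foldl astep s = (times.filter (fun d => !(d == 0))).foldl astep s := by
  induction times generalizing s with
  | nil => rfl
  | cons d t ih =>
    by_cases h : d = 0
    · subst h; simp [List.foldl, astep, ih]
    · simp [h, List.foldl_cons, ih]

-- A's loop from a real state (last_bit ∈ {"0","1"}) computes rl
lemma astep_run (l : List Int) (hnz : ∀ x ∈ l, x ≠ 0) (res : String) (neg : Bool) (delay : Int) :
    (l.foldl astep (res, bitStr neg, delay)).1 ++ (l.foldl astep (res, bitStr neg, delay)).2.1
        ++ hex4 (l.foldl astep (res, bitStr neg, delay)).2.2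
      = res ++ rl neg delay l := by
  induction l generalizing res neg delay with
  | nil => cases neg <;> simp [rl, bitStr, String.append_assoc]
  | cons d t ih =>
    have hd : d ≠ 0 := hnz d (List.mem_cons_self ..)
    have hnz' : ∀ x ∈ t, x ≠ 0 := fun x hx => hnz x (List.mem_cons_of_mem _ hx)
    rcases lt_trichotomy d 0 with h | h | h
    · cases neg with
      | true =>
        have hstep : astep (res, bitStr true, delay) d = (res, bitStr true, delay + |d|) := by
          simp [astep, bitStr, h]
        rw [List.foldl_cons, hstep, ih hnz']
        simp [rl, h]
      | false =>
        have hstep : astep (res, bitStr false, delay) d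
            = (res ++ bitStr false ++ hex4 delay, bitStr true, |d|) := by
          simp [astep, bitStr, h]
        rw [List.foldl_cons, hstep, ih hnz']
        simp [rl, h, bitStr, String.append_assoc]
    · exact absurd h hd
    · cases neg with
      | false =>
        have hstep : astep (res, bitStr false, delay) d = (res, bitStr false, delay + |d|) := by
          simp [astep, bitStr, h, not_lt.mpr h.le]
        rw [List.foldl_cons, hstep, ih hnz']
        simp [rl, not_lt.mpr h.le]
      | true =>
        have hstep : astep (res, bitStr true, delay) d
            = (res ++ bitStr true ++ hex4 delay, bitStr false, |d|) := by
          simp [astep, bitStr, h, not_lt.mpr h.le]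
        rw [List.foldl_cons, hstep, ih hnz']
        simp [rl, bitStr, not_lt.mpr h.le, String.append_assoc]

-- rl versus the span decomposition used by B (hypothesis = strong-induction access to runsB_join)
lemma rl_span (t : List Int) (neg : Bool) (delay : Int)
    (hG : ∀ m : List Int, m.length ≤ t.length →
        String.join (runsB m) = (match m with
          | [] => ""
          | d :: t' => rl (decide (d < 0)) |d| t')) :
    rl neg delay t
      = bitStr neg ++ hex4 (delay + sumabs (t.takeWhile (fun x => decide (x < 0) == neg)))
          ++ String.join (runsB (t.dropWhile (fun x => decide (x < 0) == neg))) := by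
  induction t generalizing delay with
  | nil => cases neg <;> simp [rl, runsB, bitStr, join_nil, sumabs]
  | cons d t ih =>
    have hG' : ∀ m : List Int, m.length ≤ t.length →
        String.join (runsB m) = (match m with
          | [] => ""
          | d :: t' => rl (decide (d < 0)) |d| t') :=
      fun m hm => hG m (le_trans hm (Nat.le_succ _))
    by_cases h : (decide (d < 0) == neg) = true
    · have := ih (delay + |d|) hG'
      simp [rl, h, List.takeWhile, List.dropWhile, this, sumabs_cons]
      rw [add_assoc]
    · have hm := hG (d :: t) (le_refl _)
      simp [rl, h, List.takeWhile, List.dropWhile, sumabs, hm, bitStr, String.append_assoc]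

-- B's joined runs equal the head-initialised rl
lemma runsB_join : ∀ (n : ℕ) (m : List Int), m.length ≤ n →
    String.join (runsB m) = (match m with
      | [] => ""
      | d :: t' => rl (decide (d < 0)) |d| t') := by
  intro n
  induction n with
  | zero =>
    intro m hm
    have : m = [] := List.length_eq_zero_iff.mp (Nat.le_zero.mp hm)
    subst this; simp [runsB, join_nil]
  | succ n ih =>
    intro m hm
    cases m with
    | nil => simp [runsB, join_nil]
    | cons d t =>
      have ht : t.length ≤ n := Nat.lt_succ_iff.mp (by simpa using hm)
      have hspan := rl_span t (decide (d < 0)) |d|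
        (fun m' hm' => ih m' (le_trans hm' ht))
      have hbit : (if d < 0 then "0" else "1") = bitStr (decide (d < 0)) := by
        by_cases hd : d < 0 <;> simp [bitStr, hd]
      have harg : List.foldl (fun a x => a + |x|) 0
          (d :: t.takeWhile (fun x => decide (x < 0) == decide (d < 0)))
          = |d| + sumabs (t.takeWhile (fun x => decide (x < 0) == decide (d < 0))) :=
        sumabs_cons d _
      show String.join (runsB (d :: t)) = rl (decide (d < 0)) |d| t
      simp only [runsB]
      rw [join_cons, hspan, hbit, harg, String.append_assoc]

lemma filter_eq_nil_of_D (times : List Int) (h : D_format_ardu_complex times) :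
    times.filter (fun d => !(d == 0)) = [] := by
  simp only [List.filter_eq_nil_iff]
  intro a ha
  simp [h a ha]

-- ===== VERDICT (by name: the statement is the Claim_ definition above) =====
theorem format_ardu_complex_spec : Claim_unchanged_format_ardu_complex := by
  intro times _ hD
  show format_ardu_complex times = format_ardu_complex_alt times
  simp only [format_ardu_complex, format_ardu_complex_alt]
  rw [foldl_astep_filter]
  have hnz : ∀ x ∈ times.filter (fun d => !(d == 0)), x ≠ 0 := by
    intro x hx
    have := (List.mem_filter.mp hx).2
    simpa using this
  rcases hf : times.filter (fun d => !(d == 0)) with _ | ⟨d, t⟩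
  · exfalso
    apply hD
    intro x hx
    by_contra hx0
    have : x ∈ times.filter (fun d => !(d == 0)) := List.mem_filter.mpr ⟨hx, by simpa using hx0⟩
    simp [hf] at this
  · rw [hf] at hnz
    have hd : d ≠ 0 := hnz d (List.mem_cons_self ..)
    have hnz' : ∀ x ∈ t, x ≠ 0 := fun x hx => hnz x (List.mem_cons_of_mem _ hx)
    have hB : String.join (runsB (d :: t)) = rl (decide (d < 0)) |d| t :=
      runsB_join (d :: t).length (d :: t) (le_refl _)
    have hA := astep_run t hnz' "" (decide (d < 0)) |d|
    have hstep : astep ("", "", 0) d = ("", bitStr (decide (d < 0)), |d|) := by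
      rcases lt_trichotomy d 0 with h | h | h
      · simp [astep, h, bitStr]
      · exact absurd h hd
      · simp [astep, h, not_lt.mpr h.le, bitStr]
    rw [List.foldl_cons, hstep, hB, hA]
    simp

theorem format_ardu_complex_changed : Claim_changed_format_ardu_complex := by
  unfold Claim_changed_format_ardu_complex
  refine ⟨by decide, by decide, by decide, ?_, by decide⟩
  show format_ardu_complex_alt [0] = ""
  simp only [format_ardu_complex_alt,
    show List.filter (fun d => !(d == 0)) ([0] : List Int) = [] from rfl]
  simp [runsB, join_nil]

theorem format_ardu_complex_tight : Claim_exact_format_ardu_complex := by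
  intro times _ hD
  simp only [format_ardu_complex, format_ardu_complex_alt]
  rw [foldl_astep_filter, filter_eq_nil_of_D times hD]
  simp only [runsB, join_nil, List.foldl_nil]
  decide
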